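-- pv_equiv track=rewrite | github.com/divyaprakash56/45_days_of_code | Day-6_HOSTELROOM.py | max_people_in_room
-- ===== SOURCE A (Python) =====
-- def max_people_in_room(test_cases):
--     results = []
--
--     for case in test_cases:
--         N, X, A = case
--         current_people = X
--         max_people = X
--
--         for event in A:
--             current_people += event
--             max_people = max(max_people, current_people)
--
--         results.append(max_people)
--
--     return results
-- ===== SOURCE B (Python) =====
-- def prefix_occupancies(X, A):
--     sums = [X]
--     occ = X
--     for e in A:
--         occ += e
--         sums.append(occ)
--     return sums
--
-- def max_people_in_room(test_cases):
--     return [max(prefix_occupancies(X, A)) for (N, X, A) in test_cases]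
-- ===== Notes on version B (the rewrite author's own statement) =====
-- stated objective: idiomatic
-- what changed: Replaces the fused running-sum-and-running-max loop with a generate-then-reduce decomposition: build the list of prefix occupancies (starting at X) and take max() of it, with the per-case results produced by a list comprehension instead of an accumulator list.
import Mathlib
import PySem

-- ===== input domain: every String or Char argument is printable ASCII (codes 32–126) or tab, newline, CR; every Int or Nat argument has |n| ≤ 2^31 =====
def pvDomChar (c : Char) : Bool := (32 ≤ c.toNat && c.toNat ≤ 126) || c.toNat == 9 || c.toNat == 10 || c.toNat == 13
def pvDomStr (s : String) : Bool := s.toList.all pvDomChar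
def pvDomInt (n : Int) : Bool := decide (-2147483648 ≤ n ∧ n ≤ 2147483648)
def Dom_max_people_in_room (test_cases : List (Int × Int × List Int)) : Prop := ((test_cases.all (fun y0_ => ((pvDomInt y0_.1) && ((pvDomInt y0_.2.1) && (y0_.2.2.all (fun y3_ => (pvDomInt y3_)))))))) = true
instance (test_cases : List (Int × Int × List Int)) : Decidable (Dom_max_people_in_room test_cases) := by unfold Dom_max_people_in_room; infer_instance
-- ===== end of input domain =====

-- B replaces A's fused running-sum/running-max loop with a generate-prefix-occupancies-then-max decomposition (idiomatic, same cost).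


-- ===== PORT A =====
-- literal port: outer loop appends to results; inner loop keeps (current_people, max_people)
def max_people_in_room (test_cases : List (Int × Int × List Int)) : List Int :=
  test_cases.foldl
    (fun results case =>
      let X := case.2.1
      let A := case.2.2
      let s := A.foldl (fun (s : Int × Int) event => (s.1 + event, max s.2 (s.1 + event))) (X, X)
      results ++ [s.2])
    []

-- ===== PORT B =====
-- helper prefix_occupancies: sums = [X]; occ = X; for e in A: occ += e; sums.append(occ)
def prefixOcc (X : Int) (A : List Int) : List Int :=
  (A.foldl (fun (s : List Int × Int) e => (s.1 ++ [s.2 + e], s.2 + e)) ([X], X)).1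

-- max(sums): the list is never empty, the none branch is a totality guard only
def max_people_in_room_alt (test_cases : List (Int × Int × List Int)) : List Int :=
  test_cases.map (fun case =>
    match PySem.List.max? (prefixOcc case.2.1 case.2.2) (fun y => y) with
    | some m => m
    | none => 0)

-- ===== PRECONDITION & SPEC =====
def Spec_max_people_in_room (test_cases : List (Int × Int × List Int)) (out : List Int) : Prop := out = max_people_in_room_alt test_cases
instance (test_cases : List (Int × Int × List Int)) (out : List Int) : Decidable (Spec_max_people_in_room test_cases out) := by unfold Spec_max_people_in_room; infer_instance

-- ===== CLAIM (what is proved, stated in full; the proofs are below) =====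
def Claim_equal_max_people_in_room : Prop := ∀ (test_cases : List (Int × Int × List Int)), Dom_max_people_in_room test_cases → Spec_max_people_in_room test_cases (max_people_in_room test_cases)

-- ===== LEMMAS AND PROOFS =====

theorem prefixOcc_shift (A : List Int) (pre l : List Int) (c : Int) :
    A.foldl (fun (s : List Int × Int) e => (s.1 ++ [s.2 + e], s.2 + e)) (pre ++ l, c)
      = ((pre ++ (A.foldl (fun (s : List Int × Int) e => (s.1 ++ [s.2 + e], s.2 + e)) (l, c)).1,
          (A.foldl (fun (s : List Int × Int) e => (s.1 ++ [s.2 + e], s.2 + e)) (l, c)).2)) := by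
  induction A generalizing l c with
  | nil => simp
  | cons e A ih =>
      simp only [List.foldl_cons]
      rw [List.append_assoc] at *
      exact ih (l ++ [c + e]) (c + e)

theorem prefixOcc_cons (X e : Int) (A : List Int) :
    prefixOcc X (e :: A) = X :: prefixOcc (X + e) A := by
  unfold prefixOcc
  simp only [List.foldl_cons]
  have := prefixOcc_shift A [X] [X + e] (X + e)
  simpa using congrArg Prod.fst this

theorem prefixOcc_cons_shape (A : List Int) (X : Int) :
    ∃ t, prefixOcc X A = X :: t := by
  cases A with
  | nil => exact ⟨[], rfl⟩
  | cons e A => exact ⟨prefixOcc (X + e) A, prefixOcc_cons X e A⟩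

theorem prefixOcc_foldl_max (A : List Int) (X m : Int) :
    (prefixOcc X A).foldl max m
      = (A.foldl (fun (s : Int × Int) event => (s.1 + event, max s.2 (s.1 + event))) (X, max m X)).2 := by
  induction A generalizing X m with
  | nil => simp [prefixOcc]
  | cons e A ih =>
      rw [prefixOcc_cons]
      simp only [List.foldl_cons]
      rw [ih (X + e) (max m X)]

theorem case_key (X : Int) (A : List Int) :
    (match PySem.List.max? (prefixOcc X A) (fun y => y) with
      | some m => m
      | none => 0)
      = (A.foldl (fun (s : Int × Int) event => (s.1 + event, max s.2 (s.1 + event))) (X, X)).2 := by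
  obtain ⟨t, ht⟩ := prefixOcc_cons_shape A X
  rw [ht, PySem.List.max?_id_cons]
  have h1 : t.foldl max X = (prefixOcc X A).foldl max X := by
    rw [ht]; simp
  simp only [h1, prefixOcc_foldl_max A X X, max_self]

theorem foldl_append_map (l : List (Int × Int × List Int)) (g : (Int × Int × List Int) → Int)
    (acc : List Int) :
    l.foldl (fun results case => results ++ [g case]) acc = acc ++ l.map g := by
  induction l generalizing acc with
  | nil => simp
  | cons c l ih => simp [ih]

-- ===== VERDICT (by name: the statement is the Claim_ definition above) =====
theorem max_people_in_room_spec : Claim_equal_max_people_in_room := by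
  intro tcs _
  unfold Spec_max_people_in_room max_people_in_room max_people_in_room_alt
  rw [foldl_append_map]
  simp only [List.nil_append]
  exact List.map_congr_left (fun c _ => (case_key c.2.1 c.2.2).symm)
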